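-- pv_equiv track=rewrite | github.com/sazid-alam/Inertia | fake.py | extremely_complex_function
-- ===== SOURCE A (Python) =====
-- def extremely_complex_function(n):
--     if n <= 1:
--         return n
--     result = 0
--     for i in range(n):
--         for j in range(i):
--             if j % 2 == 0:
--                 result += extremely_complex_function(j // 2)
--             else:
--                 result += extremely_complex_function(j - 1)
--     return result
-- ===== SOURCE B (Python) =====
-- def extremely_complex_function(n):
--     # Bottom-up O(n) dynamic programming with a running prefix sum.
--     # For k >= 3: f(k) - f(k-1) = sum of g(j) for j in range(k-1),
--     # where g(j) = f(j//2) if j even else f(j-1).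
--     if n <= 1:
--         return n
--     f = [0, 1, 0]          # f(0), f(1), f(2)
--     p = 0                  # running sum of g(j) for j <= k-3
--     for k in range(3, n + 1):
--         j = k - 2
--         g = f[j // 2] if j % 2 == 0 else f[j - 1]
--         p += g
--         f.append(f[-1] + p)
--     return f[n]
-- ===== Notes on version B (the rewrite author's own statement) =====
-- stated objective: faster
-- what changed: Replaces the exponential nested-loop recursion by a bottom-up O(n) dynamic program: a table of f(0..n) plus a running prefix sum of the inner-loop summand, using f(k)-f(k-1) = sum_{j<k-1} g(j).
import Mathlib
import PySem

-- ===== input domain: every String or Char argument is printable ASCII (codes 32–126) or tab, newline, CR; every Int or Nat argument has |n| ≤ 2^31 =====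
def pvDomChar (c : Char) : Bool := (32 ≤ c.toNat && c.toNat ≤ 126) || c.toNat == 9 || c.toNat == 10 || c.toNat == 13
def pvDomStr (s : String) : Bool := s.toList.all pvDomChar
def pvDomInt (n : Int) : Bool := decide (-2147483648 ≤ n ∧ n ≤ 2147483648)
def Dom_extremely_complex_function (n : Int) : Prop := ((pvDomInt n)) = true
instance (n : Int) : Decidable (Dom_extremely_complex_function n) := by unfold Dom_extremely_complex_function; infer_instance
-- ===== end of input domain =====

-- B replaces A's exponential nested-loop recursion by a bottom-up dynamic program with a
-- running prefix sum (objective: faster).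

-- ===== PORT A =====
-- Literal transliteration of A.  In the else-branch 1 < n, so range(n) is exactly
-- List.range n.toNat; inside, j ranges over naturals, so j % 2 and j // 2 are Nat % and /
-- (exact: Python's % and // agree with Nat's on nonnegative operands).  The .attach wrappers
-- only carry the membership proofs used by decreasing_by.
def extremely_complex_function (n : Int) : Int :=
  if n ≤ 1 then n
  else
    (List.range n.toNat).attach.foldl (fun result i =>
      (List.range i.1).attach.foldl (fun result j =>
        if j.1 % 2 = 0 then result + extremely_complex_function ((j.1 / 2 : Nat) : Int)
        else result + extremely_complex_function ((j.1 : Int) - 1)) result) 0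
termination_by n.toNat
decreasing_by
  · have hi := List.mem_range.mp i.2
    have hj := List.mem_range.mp j.2
    simp only [Int.toNat_natCast]
    omega
  · have hi := List.mem_range.mp i.2
    have hj := List.mem_range.mp j.2
    omega

-- ===== PORT B =====
-- B-side helper: the body of Source B's single `for k in range(3, n+1)` loop, acting on the
-- state (f, p).  The pyGetD defaults are never taken: every index is provably in range
-- (j//2 ≤ j = k-2 < len f = k, j-1 < k, and f is nonempty for f[-1]) — exact.
def bStep (st : List Int × Int) (k : Int) : List Int × Int :=
  let j := k - 2
  let g := if PySem.Int.mod j 2 = 0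
           then PySem.List.pyGetD st.1 (PySem.Int.floordiv j 2) 0   -- f[j // 2]
           else PySem.List.pyGetD st.1 (j - 1) 0                    -- f[j - 1]
  let p := st.2 + g
  (st.1 ++ [PySem.List.pyGetD st.1 (-1) 0 + p], p)                  -- f.append(f[-1] + p)

-- Literal transliteration of Source B: table f = [0,1,0], prefix sum p, one loop, return f[n]
-- (the final index n is provably in range — exact).
def extremely_complex_function_alt (n : Int) : Int :=
  if n ≤ 1 then n
  else
    let r := (PySem.List.pyRange 3 (n + 1) 1).foldl bStep ([0, 1, 0], 0)
    PySem.List.pyGetD r.1 n 0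

-- ===== PRECONDITION & SPEC =====
def Spec_extremely_complex_function (n : Int) (out : Int) : Prop := out = extremely_complex_function_alt n
instance (n : Int) (out : Int) : Decidable (Spec_extremely_complex_function n out) := by unfold Spec_extremely_complex_function; infer_instance

-- ===== CLAIM (what is proved, stated in full; the proofs are below) =====
def Claim_equal_extremely_complex_function : Prop := ∀ (n : Int), Dom_extremely_complex_function n → Spec_extremely_complex_function n (extremely_complex_function n)

-- ===== LEMMAS AND PROOFS =====

-- the inner-loop summand of A, as a function of the (natural) index j
def gA (j : Nat) : Int :=
  if j % 2 = 0 then extremely_complex_function ((j / 2 : Nat) : Int)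
  else extremely_complex_function ((j : Int) - 1)

-- the mathematical value of A's double loop
def S (m : Nat) : Int := ((List.range m).map (fun i => ((List.range i).map gA).sum)).sum

lemma A_le_one {n : Int} (h : n ≤ 1) : extremely_complex_function n = n := by
  rw [extremely_complex_function.eq_def]; simp [h]

lemma A_eq_S {n : Int} (h : 1 < n) : extremely_complex_function n = S n.toNat := by
  rw [extremely_complex_function.eq_def]
  simp only [not_le.mpr h, if_false]
  have inner : ∀ (acc : Int) (i : Nat),
      (List.range i).attach.foldl (fun result j =>
        if j.1 % 2 = 0 then result + extremely_complex_function ((j.1 / 2 : Nat) : Int)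
        else result + extremely_complex_function ((j.1 : Int) - 1)) acc
      = acc + ((List.range i).map gA).sum := by
    intro acc i
    rw [List.foldl_attach (f := fun (result : Int) (j : Nat) =>
      if j % 2 = 0 then result + extremely_complex_function ((j / 2 : Nat) : Int)
      else result + extremely_complex_function ((j : Int) - 1))]
    have hb : ∀ (result : Int) (j : Nat),
        (if j % 2 = 0 then result + extremely_complex_function ((j / 2 : Nat) : Int)
         else result + extremely_complex_function ((j : Int) - 1)) = result + gA j := by
      intro result j; unfold gA; split <;> rfl
    simp only [hb]
    exact PySem.List.foldl_add (List.range i) gA acc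
  simp only [inner]
  rw [List.foldl_attach (f := fun (result : Int) (i : Nat) =>
    result + ((List.range i).map gA).sum)]
  rw [PySem.List.foldl_add (List.range n.toNat) (fun i => ((List.range i).map gA).sum) 0]
  simp [S]

lemma S_succ (m : Nat) : S (m + 1) = S m + ((List.range m).map gA).sum := by
  simp [S, List.range_succ]

lemma A_zero : extremely_complex_function 0 = 0 := A_le_one (by norm_num)
lemma A_one : extremely_complex_function 1 = 1 := A_le_one (by norm_num)
lemma A_two : extremely_complex_function 2 = 0 := by
  rw [A_eq_S (by norm_num)]
  simp [S, List.range_succ, gA, A_zero]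

-- f-table after the whole loop up to k = m, with the invariant prefix sum
lemma loop_inv (m : Nat) (hm : 2 ≤ m) :
    (PySem.List.pyRange 3 ((m : Int) + 1) 1).foldl bStep ([0, 1, 0], 0)
    = ((List.range (m + 1)).map (fun t : Nat => extremely_complex_function (t : Int)),
       ((List.range (m - 1)).map gA).sum) := by
  induction m with
  | zero => omega
  | succ m ih =>
    rcases Nat.lt_or_ge m 2 with hlt | hge
    · -- base case m + 1 = 2: empty range
      interval_cases m
      · omega
      · rw [show ((2 : Nat) : Int) + 1 = 3 by norm_num, PySem.List.pyRange_one_eq_nil (by norm_num)]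
        simp [List.range_succ, A_zero, A_one, A_two, gA]
    · -- step: split the range at m + 1
      have hsplit : PySem.List.pyRange 3 (((m + 1 : Nat) : Int) + 1) 1
          = PySem.List.pyRange 3 ((m : Int) + 1) 1 ++ [((m : Int) + 1)] := by
        have h' : (((m + 1 : Nat) : Int) + 1) = ((m : Int) + 1) + 1 := by push_cast; ring
        rw [h', PySem.List.pyRange_one_succ_right (by omega)]
      rw [hsplit, List.foldl_append, ih hge]
      set F := (List.range (m + 1)).map (fun t : Nat => extremely_complex_function (t : Int)) with hF
      have hgetr : ∀ (t : Nat), t < m + 1 →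
          PySem.List.pyGetD F ((t : Nat) : Int) 0 = extremely_complex_function (t : Int) := by
        intro t ht
        rw [PySem.List.pyGetD_natCast, hF]
        exact PySem.List.getD_map_range _ _ _ 0 ht
      simp only [List.foldl_cons, List.foldl_nil]
      unfold bStep
      simp only []
      rw [show ((m : Int) + 1 - 2) = ((m - 1 : Nat) : Int) by omega]
      rw [PySem.Int.mod_eq_emod_of_pos (a := ((m - 1 : Nat) : Int)) (by norm_num),
          PySem.Int.floordiv_eq_ediv_of_pos (a := ((m - 1 : Nat) : Int)) (by norm_num)]
      have hg : (if ((m - 1 : Nat) : Int) % 2 = 0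
            then PySem.List.pyGetD F ((((m - 1 : Nat) : Int)) / 2) 0
            else PySem.List.pyGetD F (((m - 1 : Nat) : Int) - 1) 0)
          = gA (m - 1) := by
        unfold gA
        by_cases hpar : (m - 1) % 2 = 0
        · rw [if_pos (by omega), if_pos hpar,
              show (((m - 1 : Nat) : Int)) / 2 = (((m - 1) / 2 : Nat) : Int) by omega]
          exact hgetr _ (by omega)
        · rw [if_neg (by omega), if_neg hpar,
              show (((m - 1 : Nat) : Int)) - 1 = ((m - 2 : Nat) : Int) by omega,
              hgetr _ (by omega)]
      rw [hg]
      -- f[-1] is the last entry, extremely_complex_function m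
      have hlast : PySem.List.pyGetD F (-1) 0 = extremely_complex_function (m : Int) := by
        rw [hF, List.range_succ, List.map_append]
        exact PySem.List.pyGetD_neg_one_append_singleton _ _ _
      rw [hlast]
      -- assemble: new prefix sum and new table entry
      have hp : ((List.range (m - 1)).map gA).sum + gA (m - 1)
          = ((List.range ((m + 1) - 1)).map gA).sum := by
        have h' : (m + 1) - 1 = (m - 1) + 1 := by omega
        rw [h', List.range_succ]
        simp
      have hAm : extremely_complex_function (m : Int) = S m := by
        have h2 : (1 : Int) < (m : Int) := by exact_mod_cast hge
        rw [A_eq_S h2]; norm_num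
      have hAm1 : extremely_complex_function (((m + 1 : Nat)) : Int) = S m + ((List.range m).map gA).sum := by
        have h2 : (1 : Int) < ((m + 1 : Nat) : Int) := by exact_mod_cast Nat.lt_of_lt_of_le (by norm_num) (by omega : 2 ≤ m + 1)
        rw [A_eq_S h2, ← S_succ]
        norm_num
      refine Prod.ext ?_ hp
      show F ++ [extremely_complex_function (m : Int) + (((List.range (m - 1)).map gA).sum + gA (m - 1))]
          = (List.range (m + 1 + 1)).map (fun t : Nat => extremely_complex_function (t : Int))
      rw [List.range_succ (n := m + 1), List.map_append, hF]
      congr 1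
      simp only [List.map_cons, List.map_nil]
      congr 1
      rw [hp, show (m + 1) - 1 = m by omega, hAm1, hAm]

-- ===== VERDICT (by name: the statement is the Claim_ definition above) =====
theorem extremely_complex_function_spec : Claim_equal_extremely_complex_function := by
  intro n _
  unfold Spec_extremely_complex_function extremely_complex_function_alt
  by_cases h : n ≤ 1
  · rw [if_pos h, A_le_one h]
  · rw [if_neg h]
    have hm : 2 ≤ n.toNat := by omega
    have hcast : n + 1 = ((n.toNat : Int) + 1) := by omega
    rw [hcast, loop_inv n.toNat hm]
    have hn : n = ((n.toNat : Nat) : Int) := by omega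
    rw [show PySem.List.pyGetD ((List.range (n.toNat + 1)).map (fun t : Nat => extremely_complex_function (t : Int))) n 0
        = extremely_complex_function ((n.toNat : Nat) : Int) by
      rw [hn, PySem.List.pyGetD_natCast]
      exact PySem.List.getD_map_range _ _ _ 0 (by omega)]
    rw [← hn]
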